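-- pv_equiv track=rewrite | github.com/wzj9050/gama_code2 | PAMsearch_gama.py | F_table
-- ===== SOURCE A (Python) =====
-- def F_table(str):# `str` is bstr
--     f_return = 0
--     goto_graph = list(str)
--     f_table = []
--     for i in range(len(str)):
--         if str[i] in goto_graph[0:i]:
--             f_return = str[0:i].rfind(str[i])
--             f_table.append(f_return)
--         else:
--             f_table.append(f_return)
--     return f_table
-- ===== SOURCE B (Python) =====
-- def F_table(str):
--     # Pass 1: prev[i] = index of previous occurrence of str[i], or None if new.
--     last_seen = {}
--     prev = []
--     for i, c in enumerate(str):
--         prev.append(last_seen.get(c))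
--         last_seen[c] = i
--     # Pass 2: forward-fill, carrying the last defined previous-occurrence index.
--     f_table = []
--     carry = 0
--     for p in prev:
--         if p is not None:
--             carry = p
--         f_table.append(carry)
--     return f_table
-- ===== Notes on version B (the rewrite author's own statement) =====
-- stated objective: faster
-- what changed: Replaces A's single interleaved loop that re-slices the prefix and calls rfind at every index (quadratic) with two linear passes: a last_seen dict builds a previous-occurrence table prev, then a separate forward-fill pass carries the last defined prev value.
import Mathlib
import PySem

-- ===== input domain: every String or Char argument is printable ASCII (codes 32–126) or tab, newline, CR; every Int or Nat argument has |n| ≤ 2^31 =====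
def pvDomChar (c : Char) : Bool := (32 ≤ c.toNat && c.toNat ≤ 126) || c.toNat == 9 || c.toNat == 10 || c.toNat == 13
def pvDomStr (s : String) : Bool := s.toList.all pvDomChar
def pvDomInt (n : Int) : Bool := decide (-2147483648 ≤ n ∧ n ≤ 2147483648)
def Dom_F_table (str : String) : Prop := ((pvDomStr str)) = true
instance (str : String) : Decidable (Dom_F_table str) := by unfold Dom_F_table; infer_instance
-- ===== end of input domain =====

-- B replaces A's single interleaved scan-and-carry loop (a prefix slice, membership test and
-- rfind at every index) with two separate linear passes: a last_seen-dict pass building a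
-- previous-occurrence table, then a forward-fill pass carrying the last defined entry.

-- ===== PORT A =====
-- one iteration of A's loop body over index i (goto_graph is list(str))
def F_table_stepA (goto_graph : List Char) (st : Int × List Int) (i : Int) : Int × List Int :=
  if (PySem.List.slice goto_graph (some 0) (some i)).contains (PySem.List.pyGetD goto_graph i ' ') then
    let f_return := PySem.Chars.rfind (PySem.List.slice goto_graph (some 0) (some i))
                      [PySem.List.pyGetD goto_graph i ' ']
    (f_return, st.2 ++ [f_return])
  else
    (st.1, st.2 ++ [st.1])

def F_table (str : String) : List Int :=
  let goto_graph := str.toList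
  ((PySem.List.pyRange 0 (PySem.Str.len str) 1).foldl (F_table_stepA goto_graph) (0, [])).2

-- ===== PORT B =====
-- pass 1 body: prev.append(last_seen.get(c)); last_seen[c] = i
def F_table_prevStep (st : PySem.Dict Char Int × List (Option Int)) (ic : Int × Char) :
    PySem.Dict Char Int × List (Option Int) :=
  (st.1.insert ic.2 ic.1, st.2 ++ [st.1.get? ic.2])

-- pass 2 body: if p is not None: carry = p; f_table.append(carry)
def F_table_fillStep (st : Int × List Int) (p : Option Int) : Int × List Int :=
  let carry := match p with | some v => v | none => st.1
  (carry, st.2 ++ [carry])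

def F_table_alt (str : String) : List Int :=
  let prev := ((PySem.List.enumerate str.toList).foldl F_table_prevStep (PySem.Dict.empty, [])).2
  (prev.foldl F_table_fillStep (0, [])).2

-- ===== PRECONDITION & SPEC =====
def Spec_F_table (str : String) (out : List Int) : Prop := out = F_table_alt str
instance (str : String) (out : List Int) : Decidable (Spec_F_table str out) := by unfold Spec_F_table; infer_instance

-- ===== CLAIM (what is proved, stated in full; the proofs are below) =====
def Claim_equal_F_table : Prop := ∀ (str : String), Dom_F_table str → Spec_F_table str (F_table str)

-- ===== LEMMAS AND PROOFS =====

theorem pv_prefix_single (c : Char) (t : List Char) :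
    [c].isPrefixOf t = (t.head? == some c) := by
  cases t with
  | nil => simp [List.isPrefixOf]
  | cons x xs =>
    simp [List.isPrefixOf]
    by_cases h : c = x <;> simp [h, eq_comm]

theorem pv_go_congr (c : Char) (k : Nat) (s t : List Char)
    (h : ∀ j ≤ k, s[j]? = t[j]?) : PySem.Chars.rfind.go s [c] k = PySem.Chars.rfind.go t [c] k := by
  induction k with
  | zero =>
    have h0 := h 0 (le_refl 0)
    simp [PySem.Chars.rfind.go, pv_prefix_single, List.head?_eq_getElem?, h0]
  | succ j ih =>
    have hj := h (j+1) (le_refl _)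
    have hd : (s.drop (j+1)).head? = (t.drop (j+1)).head? := by
      simp [List.head?_drop, hj]
    simp [PySem.Chars.rfind.go, pv_prefix_single, hd,
      ih (fun i hi => h i (Nat.le_trans hi (Nat.le_succ _)))]

theorem pv_go_top (l : List Char) (x c : Char) :
    PySem.Chars.rfind.go (l ++ [x]) [c] l.length =
      if x = c then (l.length : Int) else PySem.Chars.rfind l [c] := by
  cases hl : l.length with
  | zero =>
    have hnil : l = [] := List.eq_nil_of_length_eq_zero hl
    subst hnil
    simp only [List.nil_append]
    simp [PySem.Chars.rfind, PySem.Chars.rfind.go, pv_prefix_single]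
  | succ m =>
    have hdrop : (l ++ [x]).drop (m+1) = [x] := by
      rw [← hl, List.drop_append]
      simp
    have hgo : PySem.Chars.rfind.go (l ++ [x]) [c] m = PySem.Chars.rfind.go l [c] m := by
      apply pv_go_congr
      intro i hi
      rw [List.getElem?_append_left (by omega)]
    have hrf : PySem.Chars.rfind l [c] = PySem.Chars.rfind.go l [c] m := by
      have hd2 : l.drop (m+1) = [] := List.drop_of_length_le (by omega)
      rw [PySem.Chars.rfind, hl]
      simp [PySem.Chars.rfind.go, hd2]
    rw [show PySem.Chars.rfind.go (l ++ [x]) [c] (m+1)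
        = if [c].isPrefixOf ((l ++ [x]).drop (m+1)) then ((m:Int)+1) else PySem.Chars.rfind.go (l ++ [x]) [c] m
      from by simp [PySem.Chars.rfind.go]]
    rw [hdrop, hgo, ← hrf, pv_prefix_single]
    by_cases h : x = c
    · simp [h]
    · simp [h]

theorem pv_rfind_single_snoc (l : List Char) (x c : Char) :
    PySem.Chars.rfind (l ++ [x]) [c] =
      if x = c then (l.length : Int) else PySem.Chars.rfind l [c] := by
  have hlen : (l ++ [x]).length = l.length + 1 := by simp
  have hdrop : (l ++ [x]).drop (l.length + 1) = [] := List.drop_of_length_le (by simp)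
  rw [PySem.Chars.rfind, hlen]
  rw [show PySem.Chars.rfind.go (l ++ [x]) [c] (l.length+1)
      = if [c].isPrefixOf ((l ++ [x]).drop (l.length+1)) then ((l.length:Int)+1) else PySem.Chars.rfind.go (l ++ [x]) [c] l.length
    from by simp [PySem.Chars.rfind.go]]
  rw [hdrop]
  simpa using pv_go_top l x c

theorem pv_enumerate_snoc {α : Type} (l : List α) (x : α) (s : Int) :
    PySem.List.enumerate (l ++ [x]) s = PySem.List.enumerate l s ++ [((s + l.length : Int), x)] := by
  induction l generalizing s with
  | nil => simp [PySem.List.enumerate]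
  | cons y t ih =>
    simp [PySem.List.enumerate, ih]
    omega

theorem pv_prevStep_fst (st : PySem.Dict Char Int × List (Option Int)) (ic : Int × Char) :
    (F_table_prevStep st ic).1 = st.1.insert ic.2 ic.1 := rfl

theorem pv_prevStep_snd (st : PySem.Dict Char Int × List (Option Int)) (ic : Int × Char) :
    (F_table_prevStep st ic).2 = st.2 ++ [st.1.get? ic.2] := rfl

theorem pv_main (l : List Char) (n : Nat) (hn : n ≤ l.length) :
    ((((PySem.List.enumerate (l.take n)).foldl F_table_prevStep (PySem.Dict.empty, [])).2).foldl
        F_table_fillStep (0, []))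
      = ((PySem.List.pyRange 0 (n : Int) 1).foldl (F_table_stepA l) (0, []))
    ∧ (∀ c, ((PySem.List.enumerate (l.take n)).foldl F_table_prevStep (PySem.Dict.empty, [])).1.get? c
        = if (l.take n).contains c then some (PySem.Chars.rfind (l.take n) [c]) else none) := by
  induction n with
  | zero =>
    constructor
    · simp [PySem.List.enumerate, PySem.List.pyRange]
    · intro c
      simp [PySem.List.enumerate]
  | succ n ih =>
    have hnl : n < l.length := by omega
    obtain ⟨ih1, ih2⟩ := ih (by omega)
    have htake : l.take (n+1) = l.take n ++ [l[n]] := by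
      rw [List.take_add_one]
      simp [List.getElem?_eq_getElem hnl]
    have hlen : (l.take n).length = n := List.length_take_of_le (by omega)
    have hrange : PySem.List.pyRange 0 ((n:Int)+1) 1 = PySem.List.pyRange 0 (n:Int) 1 ++ [(n:Int)] := by
      have := PySem.List.pyRange_zero_natCast (n+1)
      rw [List.range_succ] at this
      push_cast at this
      rw [this, PySem.List.pyRange_zero_natCast]
      simp
    have henum : PySem.List.enumerate (l.take (n+1)) 0
        = PySem.List.enumerate (l.take n) 0 ++ [((n:Int), l[n])] := by
      rw [htake, pv_enumerate_snoc]
      simp [hlen]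
    have hslice : PySem.List.slice l (some 0) (some (n:Int)) = l.take n := by
      simp [PySem.List.slice_to_natCast]
    have hget : PySem.List.pyGetD l ((n:Int)) ' ' = l[n] := PySem.List.pyGetD_ofNat l n ' ' hnl
    push_cast
    rw [hrange, henum]
    simp only [List.foldl_append, List.foldl_cons, List.foldl_nil]
    constructor
    · simp only [pv_prevStep_snd]
      rw [List.foldl_append]
      simp only [List.foldl_cons, List.foldl_nil]
      rw [ih1, ih2 l[n]]
      generalize List.foldl (F_table_stepA l) (0, []) (PySem.List.pyRange 0 (n:Int)) = A
      by_cases hc : l[n] ∈ l.take n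
      · simp [F_table_stepA, F_table_fillStep, hslice, hget, hc]
      · simp [F_table_stepA, F_table_fillStep, hslice, hget, hc]
    · intro c
      simp only [pv_prevStep_fst]
      rw [PySem.Dict.get?_insert, htake]
      have hsnoc := pv_rfind_single_snoc (l.take n) l[n] c
      rw [hlen] at hsnoc
      by_cases hc : c = l[n]
      · subst hc
        rw [if_pos rfl, hsnoc, if_pos rfl]
        have h1 : n < (List.take (n+1) l).length := by
          rw [List.length_take]; omega
        have hmem : l[n] ∈ List.take (n+1) l := by
          have h2 : (List.take (n+1) l)[n]'h1 = l[n] := List.getElem_take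
          exact h2 ▸ List.getElem_mem h1
        simp [hmem]
      · have hx : ¬ l[n] = c := fun h => hc h.symm
        rw [if_neg hc, ih2 c, hsnoc, if_neg hx]
        have hiff : (c ∈ List.take (n+1) l) ↔ (c ∈ List.take n l) := by
          constructor
          · intro hmem
            rw [htake] at hmem
            rcases List.mem_append.mp hmem with hmem | hmem
            · exact hmem
            · exact absurd (List.mem_singleton.mp hmem) hc
          · intro hmem
            rw [htake]
            exact List.mem_append.mpr (Or.inl hmem)
        simp [hiff]

-- ===== VERDICT (by name: the statement is the Claim_ definition above) =====
theorem F_table_spec : Claim_equal_F_table := by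
  intro str _
  unfold Spec_F_table F_table F_table_alt
  have h := (pv_main str.toList str.toList.length (le_refl _)).1
  simp only [List.take_length] at h
  simp only [PySem.Str.len]
  rw [← h]
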